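-- pv_equiv track=rewrite | github.com/Ceannn/citeseer-title-cleaning | src/features_cheap.py | _max_run
-- ===== SOURCE A (Python) =====
-- def _max_run(s: str) -> int:
--     """Return max run length of the same char."""
--     if not s:
--         return 0
--     max_len = 1
--     cur = 1
--     for i in range(1, len(s)):
--         if s[i] == s[i - 1]:
--             cur += 1
--             max_len = max(max_len, cur)
--         else:
--             cur = 1
--     return max_len
-- ===== SOURCE B (Python) =====
-- def _max_run(s: str) -> int:
--     """Return max run length of the same char."""
--     lengths = []
--     i, n = 0, len(s)
--     while i < n:
--         j = i
--         while j < n and s[j] == s[i]: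
--             j += 1
--         lengths.append(j - i)
--         i = j
--     return max(lengths, default=0)
-- ===== Notes on version B (the rewrite author's own statement) =====
-- stated objective: alternative
-- what changed: Replaces A's single pass with a running counter and per-character max-update branch by a group-then-reduce structure: an outer loop finds each maximal run with an inner scan, collects the run lengths into a list, and takes max(..., default=0).
import Mathlib
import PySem

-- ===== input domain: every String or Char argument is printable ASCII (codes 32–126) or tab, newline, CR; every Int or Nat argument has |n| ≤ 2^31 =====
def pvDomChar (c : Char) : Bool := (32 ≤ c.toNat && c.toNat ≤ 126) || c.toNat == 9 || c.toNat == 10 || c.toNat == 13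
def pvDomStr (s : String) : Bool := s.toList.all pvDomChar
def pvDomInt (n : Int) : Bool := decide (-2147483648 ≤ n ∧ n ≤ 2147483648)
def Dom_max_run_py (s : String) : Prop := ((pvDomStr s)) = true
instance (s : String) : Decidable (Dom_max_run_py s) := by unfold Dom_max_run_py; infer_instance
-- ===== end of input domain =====

-- B re-implements A as group-then-reduce (collect all run lengths, then max with default 0)
-- instead of A's running-counter loop; same O(n) cost, alternative structure.

-- ===== PORT A =====
-- A's loop over i in range(1, len(s)) comparing s[i] with s[i-1], carrying (max_len, cur);
-- ported by walking the char list carrying the previous character.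
def pvALoop : Char → List Char → Int → Int → Int
  | _, [], maxLen, _ => maxLen
  | prev, c :: rest, maxLen, cur =>
    if c == prev then pvALoop c rest (max maxLen (cur + 1)) (cur + 1)
    else pvALoop c rest maxLen 1

def max_run_py (s : String) : Int :=
  match s.toList with
  | [] => 0
  | c :: rest => pvALoop c rest 1 1

-- ===== PORT B =====
-- the outer while loop of B: each step takes one maximal run (inner scan = takeWhile)
def pvRunLens : List Char → List Int
  | [] => []
  | c :: rest =>
      let t := rest.takeWhile (· == c)
      ((t.length : Int) + 1) :: pvRunLens (rest.drop t.length)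
termination_by l => l.length
decreasing_by
  simp

def max_run_py_alt (s : String) : Int :=
  (pvRunLens s.toList).foldl max 0

-- ===== PRECONDITION & SPEC =====
def Spec_max_run_py (s : String) (out : Int) : Prop := out = max_run_py_alt s
instance (s : String) (out : Int) : Decidable (Spec_max_run_py s out) := by unfold Spec_max_run_py; infer_instance

-- ===== CLAIM (what is proved, stated in full; the proofs are below) =====
def Claim_equal_max_run_py : Prop := ∀ (s : String), Dom_max_run_py s → Spec_max_run_py s (max_run_py s)

-- ===== LEMMAS AND PROOFS =====

theorem pv_le_foldl_max : ∀ (L : List Int) (a : Int), a ≤ L.foldl max a := by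
  intro L
  induction L with
  | nil => intro a; simp [List.foldl]
  | cons b L ih =>
    intro a
    simp only [List.foldl]
    exact le_trans (le_max_left a b) (ih (max a b))

theorem pv_foldl_max_zero : ∀ (L : List Int) (a : Int), 0 ≤ a →
    L.foldl max a = max a (L.foldl max 0) := by
  intro L
  induction L with
  | nil => intro a ha; simp [List.foldl]; omega
  | cons b L ih =>
    intro a ha
    simp only [List.foldl]
    rw [ih (max a b) (by omega), ih (max 0 b) (by omega)]
    omega

-- the "rest of the string" view of the run lengths, with the current run already at count n
def pvRunsFrom : Char → Int → List Char → List Int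
  | _, n, [] => [n]
  | prev, n, c :: rest =>
    if c == prev then pvRunsFrom c (n + 1) rest
    else n :: pvRunsFrom c 1 rest

theorem pvRunsFrom_eq : ∀ (rest : List Char) (prev : Char) (n : Int),
    pvRunsFrom prev n rest =
      (n + ((rest.takeWhile (· == prev)).length : Int))
        :: pvRunLens (rest.drop (rest.takeWhile (· == prev)).length) := by
  intro rest
  induction rest with
  | nil => intro prev n; rw [pvRunsFrom, pvRunLens.eq_def]; simp
  | cons c rest ih =>
    intro prev n
    by_cases h : c = prev
    · subst h
      simp only [pvRunsFrom, List.takeWhile, beq_self_eq_true, if_pos, List.length_cons,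
        List.drop_succ_cons]
      rw [ih c (n + 1)]
      congr 1
      push_cast; ring
    · have hb : (c == prev) = false := by simpa using h
      simp only [pvRunsFrom, List.takeWhile, hb, if_neg Bool.false_ne_true]
      rw [ih c 1]
      conv_rhs => rw [pvRunLens.eq_def]
      simp [add_comm]

theorem pv_le_fold_runsFrom : ∀ (rest : List Char) (prev : Char) (n : Int), 0 ≤ n →
    n ≤ (pvRunsFrom prev n rest).foldl max 0 := by
  intro rest
  induction rest with
  | nil => intro prev n hn; simp [pvRunsFrom, List.foldl]
  | cons c rest ih =>
    intro prev n hn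
    by_cases h : c == prev
    · simp only [pvRunsFrom, h, if_true]
      exact le_trans (by omega) (ih c (n + 1) (by omega))
    · simp only [pvRunsFrom, h, Bool.false_eq_true, if_false, List.foldl]
      exact le_trans (le_max_right 0 n) (pv_le_foldl_max _ _)

theorem pvALoop_eq : ∀ (rest : List Char) (prev : Char) (maxLen cur : Int),
    1 ≤ cur → cur ≤ maxLen →
    pvALoop prev rest maxLen cur = max maxLen ((pvRunsFrom prev cur rest).foldl max 0) := by
  intro rest
  induction rest with
  | nil => intro prev maxLen cur h1 h2; simp [pvALoop, pvRunsFrom, List.foldl]; omega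
  | cons c rest ih =>
    intro prev maxLen cur h1 h2
    by_cases h : c == prev
    · simp only [pvALoop, pvRunsFrom, h, if_true]
      rw [ih c (max maxLen (cur + 1)) (cur + 1) (by omega) (by omega)]
      have hf := pv_le_fold_runsFrom rest c (cur + 1) (by omega)
      omega
    · simp only [pvALoop, pvRunsFrom, h, Bool.false_eq_true, if_false, List.foldl]
      rw [ih c maxLen 1 (by omega) (by omega)]
      rw [pv_foldl_max_zero _ (max 0 cur) (by omega)]
      omega

-- ===== VERDICT (by name: the statement is the Claim_ definition above) =====
theorem max_run_py_spec : Claim_equal_max_run_py := by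
  intro s _
  unfold Spec_max_run_py max_run_py max_run_py_alt
  cases hl : s.toList with
  | nil => rw [pvRunLens.eq_def]; simp
  | cons c rest =>
    simp only []
    rw [pvALoop_eq rest c 1 1 le_rfl le_rfl]
    have h1 : pvRunsFrom c 1 rest = pvRunLens (c :: rest) := by
      rw [pvRunsFrom_eq]
      conv_rhs => rw [pvRunLens.eq_def]
      simp [add_comm]
    have h2 : (1 : Int) ≤ (pvRunLens (c :: rest)).foldl max 0 := by
      rw [← h1]; exact pv_le_fold_runsFrom rest c 1 (by omega)
    rw [h1]
    omega
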